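-- pv_equiv track=rewrite | github.com/protean-onion/study | datastructuresandalgorithmsinpython/algorithm_attempts/ticks.py | tick_counts
-- ===== SOURCE A (Python) =====
-- def tick_counts(tick_length):
--     l = [[1,2,1]]
--     if tick_length < 3:
--         return l[0]
--     if tick_length >= 3:
--         for i in range(3, tick_length + 1):
--             temp = []
--             temp.extend(l[i - 3])
--             temp.extend([i])
--             temp.extend(l[i - 3])
--             l.append(temp)
--     return l[-1]
-- ===== SOURCE B (Python) =====
-- def tick_counts(tick_length):
--     # value at 1-based position p of the ruler sequence is 1 + (number of
--     # trailing binary zeros of p); build the list in one flat pass.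
--     m = tick_length if tick_length >= 3 else 2
--     out = []
--     for p in range(1, 2 ** m):
--         v = 1
--         while p % 2 == 0:
--             p //= 2
--             v += 1
--         out.append(v)
--     return out
-- ===== Notes on version B (the rewrite author's own statement) =====
-- stated objective: alternative
-- what changed: B derives each element of the ruler sequence directly from its position (one plus its count of trailing binary zeros) in a single flat pass over the range, instead of A's recursive doubling that keeps a table of all previous levels and concatenates them.
import Mathlib
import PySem

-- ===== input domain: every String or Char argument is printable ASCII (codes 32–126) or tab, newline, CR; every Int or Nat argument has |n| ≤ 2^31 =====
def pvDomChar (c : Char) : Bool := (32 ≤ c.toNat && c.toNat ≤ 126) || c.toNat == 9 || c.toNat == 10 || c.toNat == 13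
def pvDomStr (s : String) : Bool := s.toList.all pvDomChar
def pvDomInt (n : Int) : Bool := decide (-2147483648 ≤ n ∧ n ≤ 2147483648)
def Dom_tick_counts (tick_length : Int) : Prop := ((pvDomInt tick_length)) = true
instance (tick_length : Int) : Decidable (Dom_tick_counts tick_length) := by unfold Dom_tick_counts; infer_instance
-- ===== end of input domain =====

-- B computes each element directly from its 1-based index (1 + its count of trailing binary
-- zeros) in one flat pass, instead of A's recursive doubling over a table of all levels.

-- ===== PORT A =====
def tick_counts (tick_length : Int) : List Int :=
  let l : List (List Int) := [[1, 2, 1]]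
  if tick_length < 3 then
    -- l[0]; index always in range, '.getD []' is only a totality default
    (PySem.List.pyGet? l 0).getD []
  else
    let l :=
      if tick_length ≥ 3 then
        (PySem.List.pyRange 3 (tick_length + 1) 1).foldl
          (fun l i =>
            -- temp = []; temp.extend(l[i-3]); temp.extend([i]); temp.extend(l[i-3])
            let temp : List Int :=
              ([] ++ (PySem.List.pyGet? l (i - 3)).getD [] ++ [i]
                  ++ (PySem.List.pyGet? l (i - 3)).getD [])
            l ++ [temp]) l
      else l
    -- l[-1]; l is nonempty, '.getD []' is only a totality default
    (PySem.List.pyGet? l (-1)).getD []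

-- ===== PORT B =====
-- the 'while p % 2 == 0: p //= 2; v += 1' loop; the 'p ≠ 0' guard only makes it total
-- (every call in tick_counts_alt has p ≥ 1, where Python's loop terminates too)
def tickVal (p : Nat) (v : Int) : Int :=
  if p ≠ 0 ∧ p % 2 = 0 then tickVal (p / 2) (v + 1) else v
termination_by p
decreasing_by exact Nat.div_lt_self (by omega) one_lt_two

def tick_counts_alt (tick_length : Int) : List Int :=
  let m : Int := if tick_length ≥ 3 then tick_length else 2
  -- m ≥ 2 always, so '.toNat' is exact for 'range(1, 2 ** m)'
  (PySem.List.pyRange 1 ((2 : Int) ^ m.toNat) 1).foldl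
    (fun out p => out ++ [tickVal p.toNat 1]) []

-- ===== PRECONDITION & SPEC =====
def Spec_tick_counts (tick_length : Int) (out : List Int) : Prop := out = tick_counts_alt tick_length
instance (tick_length : Int) (out : List Int) : Decidable (Spec_tick_counts tick_length out) := by unfold Spec_tick_counts; infer_instance

-- ===== CLAIM (what is proved, stated in full; the proofs are below) =====
def Claim_equal_tick_counts : Prop := ∀ (tick_length : Int), Dom_tick_counts tick_length → Spec_tick_counts tick_length (tick_counts tick_length)

-- ===== LEMMAS AND PROOFS =====

/-- `ruler k` is level `k + 2` of A's table (`ruler 0 = [1]` is the virtual level 1,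
`ruler 1 = [1,2,1]` the stored base level). -/
def ruler : Nat → List Int
  | 0 => [1]
  | n + 1 => ruler n ++ [(n : Int) + 2] ++ ruler n

lemma tickVal_of_odd (p : Nat) (v : Int) (h : p % 2 = 1) : tickVal p v = v := by
  rw [tickVal, if_neg (by omega)]

lemma tickVal_shift (p : Nat) (v : Int) : tickVal p v = tickVal p 0 + v := by
  induction p using Nat.strong_induction_on generalizing v with
  | _ p ih =>
    conv_lhs => rw [tickVal]
    conv_rhs => rw [tickVal]
    split_ifs with h
    · have hlt : p / 2 < p := Nat.div_lt_self (by omega) one_lt_two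
      rw [ih _ hlt (v + 1), ih _ hlt (0 + 1)]; ring
    · ring

lemma tickVal_two_mul (p : Nat) (hp : p ≠ 0) (v : Int) :
    tickVal (2 * p) v = tickVal p (v + 1) := by
  rw [tickVal, if_pos ⟨by omega, by omega⟩]
  congr 1
  omega

lemma tickVal_pow (k : Nat) : tickVal (2 ^ k) 1 = (k : Int) + 1 := by
  induction k with
  | zero => rw [tickVal, if_neg (by simp)]; simp
  | succ k ih =>
    rw [pow_succ, mul_comm, tickVal_two_mul _ (by positivity), tickVal_shift]
    rw [tickVal_shift] at ih
    push_cast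
    linarith

lemma tickVal_add_pow (n : Nat) : ∀ q : Nat, 1 ≤ q → q < 2 ^ (n + 1) →
    tickVal (2 ^ (n + 1) + q) 1 = tickVal q 1 := by
  induction n with
  | zero =>
    intro q h1 h2
    have : q = 1 := by omega
    subst this
    rw [tickVal_of_odd _ _ (by omega), tickVal_of_odd _ _ (by omega)]
  | succ n ih =>
    intro q h1 h2
    have hp2 : 2 ^ (n + 2) % 2 = 0 := by simp [Nat.pow_mod]
    by_cases hq : q % 2 = 1
    · rw [tickVal_of_odd _ _ (by omega), tickVal_of_odd _ _ hq]
    · have hq0 : q % 2 = 0 := by omega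
      have hpow : 2 ^ (n + 2) = 2 ^ (n + 1) + 2 ^ (n + 1) := by ring
      have hsum : 2 ^ (n + 2) + q = 2 * (2 ^ (n + 1) + q / 2) := by omega
      have hih := ih (q / 2) (by omega) (by omega)
      rw [tickVal_shift] at hih
      have hlhs : tickVal (2 ^ (n + 2) + q) 1 = tickVal (2 ^ (n + 1) + q / 2) 0 + 2 := by
        rw [hsum, tickVal_two_mul _ (by positivity), tickVal_shift]; ring
      have hrhs : tickVal q 1 = tickVal (q / 2) 0 + 2 := by
        conv_lhs => rw [show q = 2 * (q / 2) by omega]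
        rw [tickVal_two_mul _ (by omega), tickVal_shift]; ring
      rw [hlhs, hrhs]
      have hq2 : tickVal (q / 2) (1 : Int) = tickVal (q / 2) 0 + 1 := tickVal_shift _ _
      linarith

lemma pyRange_shift (a b c : Int) :
    PySem.List.pyRange (a + c) (b + c) 1 = (PySem.List.pyRange a b 1).map (· + c) := by
  rw [PySem.List.pyRange_one, PySem.List.pyRange_one, List.map_map]
  have h : b + c - (a + c) = b - a := by ring
  rw [h]
  apply List.map_congr_left
  intro k _
  simp
  ring

lemma alt_map (n : Nat) :
    (PySem.List.pyRange 1 ((2 : Int) ^ (n + 1)) 1).map (fun p => tickVal p.toNat 1)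
      = ruler n := by
  induction n with
  | zero =>
    have h2 : (2 : Int) ^ (0 + 1) = 1 + 1 := by norm_num
    rw [h2, PySem.List.pyRange_one_singleton]
    simp [ruler, tickVal_of_odd 1 1 (by omega)]
  | succ n ih =>
    have hpos : (1 : Int) ≤ 2 ^ (n + 1) := one_le_pow₀ (by norm_num)
    have hd : (2 : Int) ^ (n + 2) = 2 ^ (n + 1) + 2 ^ (n + 1) := by ring
    have hsplit : PySem.List.pyRange 1 ((2 : Int) ^ (n + 2)) 1
        = PySem.List.pyRange 1 ((2 : Int) ^ (n + 1)) 1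
          ++ (PySem.List.pyRange ((2 : Int) ^ (n + 1)) ((2 : Int) ^ (n + 1) + 1) 1
          ++ PySem.List.pyRange ((2 : Int) ^ (n + 1) + 1) ((2 : Int) ^ (n + 2)) 1) := by
      rw [← PySem.List.pyRange_one_append ((2 : Int) ^ (n + 1)) ((2 : Int) ^ (n + 1) + 1)
            ((2 : Int) ^ (n + 2)) (by linarith) (by linarith),
          ← PySem.List.pyRange_one_append 1 ((2 : Int) ^ (n + 1)) ((2 : Int) ^ (n + 2))
            (by linarith) (by linarith)]
    have htoNat : ((2 : Int) ^ (n + 1)).toNat = 2 ^ (n + 1) := by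
      rw [show (2 : Int) ^ (n + 1) = ((2 ^ (n + 1) : Nat) : Int) by push_cast; ring,
          Int.toNat_natCast]
    have hshift : PySem.List.pyRange ((2 : Int) ^ (n + 1) + 1) ((2 : Int) ^ (n + 2)) 1
        = (PySem.List.pyRange 1 ((2 : Int) ^ (n + 1)) 1).map (· + (2 : Int) ^ (n + 1)) := by
      rw [show (2 : Int) ^ (n + 1) + 1 = 1 + 2 ^ (n + 1) by ring,
          show (2 : Int) ^ (n + 2) = 2 ^ (n + 1) + 2 ^ (n + 1) by ring]
      exact pyRange_shift 1 ((2 : Int) ^ (n + 1)) ((2 : Int) ^ (n + 1))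
    rw [hsplit, List.map_append, List.map_append, ih, PySem.List.pyRange_one_singleton,
        hshift, List.map_map]
    have hthird : (PySem.List.pyRange 1 ((2 : Int) ^ (n + 1)) 1).map
          ((fun p : Int => tickVal p.toNat 1) ∘ (· + (2 : Int) ^ (n + 1)))
        = ruler n := by
      rw [← ih]
      apply List.map_congr_left
      intro q hq
      rw [PySem.List.mem_pyRange_one] at hq
      have hq2 : q < ((2 ^ (n + 1) : Nat) : Int) := by push_cast; linarith [hq.2]
      have hqt : (q + (2 : Int) ^ (n + 1)).toNat = 2 ^ (n + 1) + q.toNat := by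
        rw [show (2 : Int) ^ (n + 1) = ((2 ^ (n + 1) : Nat) : Int) by push_cast; ring]
        omega
      simp only [Function.comp]
      rw [hqt, tickVal_add_pow n q.toNat (by omega) (by omega)]
    rw [hthird]
    show ruler n ++ ([tickVal ((2 : Int) ^ (n + 1)).toNat 1] ++ ruler n) = ruler (n + 1)
    rw [htoNat, tickVal_pow, show (((n + 1 : Nat) : Int)) + 1 = (n : Int) + 2 by push_cast; ring,
        ruler, List.append_assoc]

lemma a_loop (n : Nat) :
    (PySem.List.pyRange 3 (3 + (n : Int)) 1).foldl
      (fun l i =>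
        let temp : List Int :=
          ([] ++ (PySem.List.pyGet? l (i - 3)).getD [] ++ [i]
              ++ (PySem.List.pyGet? l (i - 3)).getD [])
        l ++ [temp]) [[1, 2, 1]]
    = (List.range (n + 1)).map (fun k => ruler (k + 1)) := by
  induction n with
  | zero =>
    rw [show (3 : Int) + ((0 : Nat) : Int) = 3 by norm_num,
        PySem.List.pyRange_one_eq_nil (by omega)]
    simp [ruler]
  | succ n ih =>
    rw [show (3 : Int) + ((n + 1 : Nat) : Int) = (3 + (n : Int)) + 1 by push_cast; ring,
        PySem.List.pyRange_one_succ_right (by omega), List.foldl_append, ih]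
    simp only [List.foldl_cons, List.foldl_nil]
    have hget : PySem.List.pyGet? ((List.range (n + 1)).map (fun k => ruler (k + 1)))
        ((3 + (n : Int)) - 3) = some (ruler (n + 1)) := by
      rw [show (3 + (n : Int)) - 3 = ((n : Nat) : Int) by ring, PySem.List.pyGet?_natCast,
          List.getElem?_map, List.getElem?_range (by omega)]
      rfl
    rw [hget]
    rw [List.range_succ (n := n + 1), List.map_append]
    simp only [List.map_cons, List.map_nil, Option.getD_some, List.nil_append]
    congr 2
    rw [show (3 + (n : Int)) = ((n + 1 : Nat) : Int) + 2 by push_cast; ring]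
    rfl

-- ===== VERDICT (by name: the statement is the Claim_ definition above) =====
theorem tick_counts_spec : Claim_equal_tick_counts := by
  intro t _
  unfold Spec_tick_counts
  by_cases h : t < 3
  · -- both sides are the base case [1, 2, 1] = ruler 1
    have hA : tick_counts t = [1, 2, 1] := by
      simp [tick_counts, if_pos h]
    have hB : tick_counts_alt t = [1, 2, 1] := by
      simp only [tick_counts_alt, if_neg (by omega : ¬ t ≥ 3)]
      rw [PySem.List.foldl_append_singleton_eq_map, List.nil_append,
          show ((2 : Int).toNat) = 1 + 1 by rfl, alt_map 1]
      simp [ruler]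
    rw [hA, hB]
  · obtain ⟨n, hn⟩ : ∃ n : Nat, t = (n : Int) + 3 := ⟨(t - 3).toNat, by omega⟩
    subst hn
    have hA : tick_counts ((n : Int) + 3) = ruler (n + 2) := by
      simp only [tick_counts, if_neg h, if_pos (by omega : (n : Int) + 3 ≥ 3)]
      rw [show (n : Int) + 3 + 1 = 3 + ((n + 1 : Nat) : Int) by push_cast; ring,
          a_loop (n + 1), List.range_succ, List.map_append]
      simp only [List.map_cons, List.map_nil]
      rw [PySem.List.pyGet?_neg_one_append_singleton]
      rfl
    have hB : tick_counts_alt ((n : Int) + 3) = ruler (n + 2) := by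
      simp only [tick_counts_alt, if_pos (by omega : (n : Int) + 3 ≥ 3)]
      rw [PySem.List.foldl_append_singleton_eq_map, List.nil_append,
          show ((n : Int) + 3).toNat = (n + 2) + 1 by omega]
      exact alt_map (n + 2)
    rw [hA, hB]
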